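-- pv_equiv track=rewrite | github.com/jepebe/aoc2018 | aoc2023/day6/day6.py | find_losing_edge
-- ===== SOURCE A (Python) =====
-- def find_losing_edge(start: int, end: int, length: int, record: int) -> int:
--     """The edge where we start losing again."""
--     if start == end:
--         return start
--
--     pos = (start + end) // 2
--     if pos * (length - pos) > record:
--         return find_losing_edge(pos + 1, end, length, record)
--     else:
--         return find_losing_edge(start, pos, length, record)
-- ===== SOURCE B (Python) =====
-- def find_losing_edge(start: int, end: int, length: int, record: int) -> int:
--     """The edge where we start losing again (lower_bound-style: track base + width)."""
--     lo, n = start, end - start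
--     while n > 0:
--         half = n // 2
--         pos = lo + half
--         if pos * (length - pos) > record:
--             lo = pos + 1
--             n -= half + 1
--         else:
--             n = half
--     return lo
-- ===== Notes on version B (the rewrite author's own statement) =====
-- stated objective: alternative
-- what changed: Replaced the tail-recursive lo/hi binary search by an iterative lower_bound-style loop over a base pointer and a remaining width n, halving n each step (pos = lo + n//2) instead of recomputing a hi bound.
import Mathlib
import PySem

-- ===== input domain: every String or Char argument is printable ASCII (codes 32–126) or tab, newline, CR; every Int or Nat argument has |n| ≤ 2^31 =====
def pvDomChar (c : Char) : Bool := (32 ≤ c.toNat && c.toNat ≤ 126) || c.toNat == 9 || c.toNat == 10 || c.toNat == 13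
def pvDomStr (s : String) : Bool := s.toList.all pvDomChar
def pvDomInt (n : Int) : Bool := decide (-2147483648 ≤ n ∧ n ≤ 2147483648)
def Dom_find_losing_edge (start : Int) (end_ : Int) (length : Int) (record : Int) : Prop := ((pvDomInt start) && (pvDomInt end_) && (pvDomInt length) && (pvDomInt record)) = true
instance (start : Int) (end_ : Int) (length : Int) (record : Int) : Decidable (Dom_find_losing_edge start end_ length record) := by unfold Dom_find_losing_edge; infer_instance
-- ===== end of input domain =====

-- B replaces A's lo/hi tail recursion by a lower_bound-style loop over a base pointer
-- and a remaining width n (pos = lo + n//2); equivalence is claimed for start ≤ end,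
-- where A's recursion terminates.

-- ===== PORT A =====
-- A's recursion is ported with a fuel guard (only for totality; (end_ - start).toNat + 1
-- steps always suffice on Pre_, as each call shrinks the interval by at least 1).
def pvGoA (fuel : Nat) (start : Int) (end_ : Int) (length : Int) (record : Int) : Int :=
  match fuel with
  | 0 => start
  | f + 1 =>
    if start = end_ then start
    else
      let pos := PySem.Int.floordiv (start + end_) 2
      if pos * (length - pos) > record then pvGoA f (pos + 1) end_ length record
      else pvGoA f start pos length record

def find_losing_edge (start : Int) (end_ : Int) (length : Int) (record : Int) : Int :=
  pvGoA ((end_ - start).toNat + 1) start end_ length record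

-- ===== PORT B =====
-- B's while-loop over the state (lo, n); n.toNat strictly decreases while n > 0,
-- so the loop is ported as a well-founded recursion on n.toNat (no fuel).
def pvHalfLt (n : Int) (h : 0 < n) : (PySem.Int.floordiv n 2).toNat < n.toNat ∧
    (n - (PySem.Int.floordiv n 2 + 1)).toNat < n.toNat ∧ 0 ≤ PySem.Int.floordiv n 2 := by
  have hb : (0:Int) < 2 := by omega
  have := (PySem.Int.floordiv_eq_iff_of_pos (a := n) (b := 2)
    (q := PySem.Int.floordiv n 2) hb).mp rfl
  omega

def pvLoopB (lo : Int) (n : Int) (length : Int) (record : Int) : Int :=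
  if h : 0 < n then
    let half := PySem.Int.floordiv n 2
    let pos := lo + half
    if pos * (length - pos) > record then pvLoopB (pos + 1) (n - (half + 1)) length record
    else pvLoopB lo half length record
  else lo
termination_by n.toNat
decreasing_by
  · exact (pvHalfLt n h).2.1
  · exact (pvHalfLt n h).1

def find_losing_edge_alt (start : Int) (end_ : Int) (length : Int) (record : Int) : Int :=
  pvLoopB start (end_ - start) length record

-- ===== PRECONDITION & SPEC =====
-- A's recursion never reaches start == end when start > end (its RecursionError region);
-- Pre_ keeps exactly the inputs on which the Python A returns.
def Pre_find_losing_edge (start : Int) (end_ : Int) (length : Int) (record : Int) : Prop :=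
  start ≤ end_
instance (start : Int) (end_ : Int) (length : Int) (record : Int) : Decidable (Pre_find_losing_edge start end_ length record) := by unfold Pre_find_losing_edge; infer_instance

def pvWitness_find_losing_edge : Int × Int × Int × Int := (0, 10, 7, 6)

def Spec_find_losing_edge (start : Int) (end_ : Int) (length : Int) (record : Int) (out : Int) : Prop := out = find_losing_edge_alt start end_ length record
instance (start : Int) (end_ : Int) (length : Int) (record : Int) (out : Int) : Decidable (Spec_find_losing_edge start end_ length record out) := by unfold Spec_find_losing_edge; infer_instance

-- ===== CLAIM (what is proved, stated in full; the proofs are below) =====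
def Claim_equal_find_losing_edge : Prop := ∀ (start : Int) (end_ : Int) (length : Int) (record : Int), Dom_find_losing_edge start end_ length record → Pre_find_losing_edge start end_ length record → Spec_find_losing_edge start end_ length record (find_losing_edge start end_ length record)


-- ===== LEMMAS AND PROOFS =====

-- Midpoint identity linking the two state representations:
-- (s + e) // 2 = s + (e - s) // 2.
theorem pv_mid_shift (s e : Int) :
    PySem.Int.floordiv (s + e) 2 = s + PySem.Int.floordiv (e - s) 2 := by
  have hb : (0:Int) < 2 := by omega
  have h1 := (PySem.Int.floordiv_eq_iff_of_pos (a := s + e) (b := 2)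
    (q := PySem.Int.floordiv (s + e) 2) hb).mp rfl
  have h2 := (PySem.Int.floordiv_eq_iff_of_pos (a := e - s) (b := 2)
    (q := PySem.Int.floordiv (e - s) 2) hb).mp rfl
  omega

-- With enough fuel, A's recursion on (s, e) equals B's loop on (s, e - s).
theorem pvGoA_eq_loopB (fuel : Nat) :
    ∀ (s e l r : Int), s ≤ e → (e - s).toNat < fuel →
      pvGoA fuel s e l r = pvLoopB s (e - s) l r := by
  induction fuel with
  | zero => intro s e l r _ h; omega
  | succ f ih =>
    intro s e l r hle hf
    rw [pvGoA, pvLoopB]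
    by_cases hse : s = e
    · simp [hse]
    · have hpos : 0 < e - s := by omega
      have hb : (0:Int) < 2 := by omega
      have hq := (PySem.Int.floordiv_eq_iff_of_pos (a := e - s) (b := 2)
        (q := PySem.Int.floordiv (e - s) 2) hb).mp rfl
      simp only [hse, if_false, dif_pos hpos, pv_mid_shift s e]
      set q := PySem.Int.floordiv (e - s) 2 with hqdef
      by_cases hc : (s + q) * (l - (s + q)) > r
      · simp only [if_pos hc]
        have := ih (s + q + 1) e l r (by omega) (by omega)
        rw [this]; ring_nf
      · simp only [if_neg hc]
        have := ih s (s + q) l r (by omega) (by omega)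
        rw [this]; ring_nf

-- ===== VERDICT (by name: the statements are the Claim_ definitions above) =====
theorem find_losing_edge_spec : Claim_equal_find_losing_edge := by
  intro s e l r _ hpre
  unfold Spec_find_losing_edge find_losing_edge find_losing_edge_alt
  exact pvGoA_eq_loopB _ s e l r hpre (by omega)
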